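-- pv_equiv track=rewrite | github.com/jiyooonkim/data-engineer | commerce/src/etc/test.py | get_triple_token
-- ===== SOURCE A (Python) =====
-- def get_triple_token(tks, tk):
--     output_total = []
--     contain_tk_set = []
--     for i in range(0, len(tks)):
--         for j in range(i, len(tks)):
--             for k in range(j, len(tks)):
--                 if (tks[i].__ne__(tks[j])) & (tks[j].__ne__(tks[k])) & (tks[k].__ne__(tks[i])):
--                     if (tk.__eq__(tks[i])) | (tk.__eq__(tks[j])) | (tk.__eq__(tks[k])):
--                         contain_tk_set.append(([tks[i], tks[j], tks[k]]))
--                     else: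
--                         output_total.append(([tks[i], tks[j], tks[k]]))
--     return contain_tk_set, output_total
-- ===== SOURCE B (Python) =====
-- def get_triple_token(tks, tk):
--     # Recurse over suffixes, emitting only strict i<j<k combinations: any triple
--     # with a repeated index repeats a value and would fail the distinctness test.
--     contain_tk_set = []
--     output_total = []
--
--     def choose_second(x, suffix):
--         if not suffix:
--             return
--         y, rest = suffix[0], suffix[1:]
--         if y != x:
--             for z in rest:
--                 if z != x and z != y:
--                     if tk == x or tk == y or tk == z:
--                         contain_tk_set.append([x, y, z])
--                     else:
--                         output_total.append([x, y, z])
--         choose_second(x, rest)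
--
--     def choose_first(suffix):
--         if not suffix:
--             return
--         x, rest = suffix[0], suffix[1:]
--         choose_second(x, rest)
--         choose_first(rest)
--
--     choose_first(list(tks))
--     return contain_tk_set, output_total
-- ===== Notes on version B (the rewrite author's own statement) =====
-- stated objective: alternative
-- what changed: Replaces A's three nested inclusive index-range loops (which enumerate all i<=j<=k index multisets and filter by value-distinctness) with a recursion over list suffixes that emits only strict i<j<k combinations and skips the inner scan as soon as the second pick equals the first; triples with a repeated index repeat a value and could never pass A's distinctness test, so the emitted lists and their order are identical, while roughly half of A's iterations and all repeated indexing disappear.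
import Mathlib
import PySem

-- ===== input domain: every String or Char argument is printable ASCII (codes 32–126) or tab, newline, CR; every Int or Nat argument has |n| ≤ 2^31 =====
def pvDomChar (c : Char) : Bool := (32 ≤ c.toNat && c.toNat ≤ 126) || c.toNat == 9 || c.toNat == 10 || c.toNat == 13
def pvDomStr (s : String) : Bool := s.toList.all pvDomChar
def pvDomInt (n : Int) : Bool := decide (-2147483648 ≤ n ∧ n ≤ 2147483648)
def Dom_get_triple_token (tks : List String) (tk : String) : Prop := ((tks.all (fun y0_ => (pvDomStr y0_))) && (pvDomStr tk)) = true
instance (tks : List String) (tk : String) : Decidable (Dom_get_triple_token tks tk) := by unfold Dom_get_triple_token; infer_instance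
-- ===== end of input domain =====

-- B replaces A's three inclusive index ranges by a recursion over suffixes that emits only
-- strict i<j<k combinations (repeated indices repeat a value and never pass A's distinctness
-- test), skipping the inner loops early when the second pick equals the first: alternative decomposition.

-- ===== PORT A =====
-- literal transliteration of A's triple nested range loops (indices are always in range,
-- so tks[i] is List.getD; Python's eager `&`/`|` on bools are ∧/∨ here)
def get_triple_token (tks : List String) (tk : String) : List (List String) × List (List String) :=
  let n := tks.length
  (List.range' 0 n).foldl (fun st i =>
    (List.range' i (n - i)).foldl (fun st j =>
      (List.range' j (n - j)).foldl (fun st k =>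
        let a := tks.getD i ""
        let b := tks.getD j ""
        let c := tks.getD k ""
        if a ≠ b ∧ b ≠ c ∧ c ≠ a then
          if tk = a ∨ tk = b ∨ tk = c then (st.1 ++ [[a, b, c]], st.2)
          else (st.1, st.2 ++ [[a, b, c]])
        else st) st) st) (([], []) : List (List String) × List (List String))

-- ===== PORT B =====
-- transliteration of Source B: choose_second walks the suffixes of the tail after the first pick
def altSecond (tk x : String) : List String → List (List String) × List (List String) → List (List String) × List (List String)
  | [], st => st
  | y :: rest, st =>
      altSecond tk x rest
        (if y ≠ x then
          rest.foldl (fun st z =>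
            if z ≠ x ∧ z ≠ y then
              if tk = x ∨ tk = y ∨ tk = z then (st.1 ++ [[x, y, z]], st.2)
              else (st.1, st.2 ++ [[x, y, z]])
            else st) st
        else st)

def altFirst (tk : String) : List String → List (List String) × List (List String) → List (List String) × List (List String)
  | [], st => st
  | x :: rest, st => altFirst tk rest (altSecond tk x rest st)

def get_triple_token_alt (tks : List String) (tk : String) : List (List String) × List (List String) :=
  altFirst tk tks ([], [])

-- ===== PRECONDITION & SPEC =====
def Spec_get_triple_token (tks : List String) (tk : String) (out : List (List String) × List (List String)) : Prop := out = get_triple_token_alt tks tk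
instance (tks : List String) (tk : String) (out : List (List String) × List (List String)) : Decidable (Spec_get_triple_token tks tk out) := by unfold Spec_get_triple_token; infer_instance

-- ===== CLAIM (what is proved, stated in full; the proofs are below) =====
def Claim_equal_get_triple_token : Prop := ∀ (tks : List String) (tk : String), Dom_get_triple_token tks tk → Spec_get_triple_token tks tk (get_triple_token tks tk)

-- ===== LEMMAS AND PROOFS =====

def stepA (tk x y z : String) (st : List (List String) × List (List String)) : List (List String) × List (List String) :=
  if x ≠ y ∧ y ≠ z ∧ z ≠ x then
    if tk = x ∨ tk = y ∨ tk = z then (st.1 ++ [[x, y, z]], st.2)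
    else (st.1, st.2 ++ [[x, y, z]])
  else st

-- fold over the (nonempty) suffixes of a list
def suffFold {α σ : Type} (g : σ → List α → σ) : List α → σ → σ
  | [], st => st
  | x :: xs, st => suffFold g xs (g st (x :: xs))

-- fold over range' j (xs.length - j) of a body that only looks at xs.drop i  =  suffFold
theorem range'_drop_fold {α σ : Type} (xs : List α) (g : σ → List α → σ) :
    ∀ (l : List α) (j : Nat), xs.drop j = l → ∀ st,
      (List.range' j (xs.length - j)).foldl (fun st i => g st (xs.drop i)) st = suffFold g l st := by
  intro l
  induction l with
  | nil =>
      intro j h st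
      have hle : xs.length ≤ j := List.drop_eq_nil_iff.mp h
      have : xs.length - j = 0 := Nat.sub_eq_zero_of_le hle
      simp [this, suffFold]
  | cons x tl ih =>
      intro j h st
      have hlt : j < xs.length := by
        by_contra hc
        have : xs.drop j = [] := List.drop_eq_nil_iff.mpr (Nat.le_of_not_lt hc)
        simp [this] at h
      have hsub : xs.length - j = (xs.length - (j + 1)) + 1 := by omega
      have hdrop : xs.drop (j + 1) = tl := by
        rw [← List.tail_drop, h]; rfl
      rw [hsub, List.range'_succ, List.foldl_cons]
      rw [h]
      rw [ih (j + 1) hdrop _]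
      rfl

-- a suffFold whose body only uses the head is a plain foldl
theorem suffFold_head {α σ : Type} (d : α) (h : σ → α → σ) :
    ∀ (l : List α) (st : σ),
      suffFold (fun st suf => h st (suf.headD d)) l st = l.foldl h st := by
  intro l
  induction l with
  | nil => intro st; rfl
  | cons x xs ih => intro st; rw [suffFold]; exact ih (h st x)

-- getD through drop
theorem getD_eq_headD_drop (xs : List String) (i : Nat) (l : List String) (h : xs.drop i = l) :
    xs.getD i "" = l.headD "" := by
  subst h
  cases hx : xs.drop i with
  | nil => simp [List.getD, ← List.head?_drop, hx]
  | cons a t =>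
      have : xs[i]? = some a := by rw [← List.head?_drop, hx]; rfl
      simp [List.getD, this]

-- A in suffix form
def g2 (tk x : String) (st : List (List String) × List (List String)) (suf : List String) :
    List (List String) × List (List String) :=
  suf.foldl (fun st z => stepA tk x (suf.headD "") z st) st

def g1 (tk : String) (st : List (List String) × List (List String)) (suf : List String) :
    List (List String) × List (List String) :=
  suffFold (g2 tk (suf.headD "")) suf st

-- step with y = x is the identity
theorem stepA_self_left (tk x z : String) (st : List (List String) × List (List String)) :
    stepA tk x x z st = st := by
  simp [stepA]

-- when y ≠ x, A's innermost step equals B's innermost step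
theorem stepA_eq_altStep (tk x y z : String) (hyx : y ≠ x)
    (st : List (List String) × List (List String)) :
    stepA tk x y z st =
      (if z ≠ x ∧ z ≠ y then
        if tk = x ∨ tk = y ∨ tk = z then (st.1 ++ [[x, y, z]], st.2)
        else (st.1, st.2 ++ [[x, y, z]])
      else st) := by
  unfold stepA
  by_cases h1 : z = x <;> by_cases h2 : z = y <;>
    first
    | (simp [h1, h2, hyx, Ne.symm hyx]; tauto)
    | simp [h1, h2, hyx, Ne.symm hyx]

theorem fold_stepA_eq_alt (tk x y : String) (hyx : y ≠ x) :
    ∀ (l : List String) (st : List (List String) × List (List String)),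
      l.foldl (fun st z => stepA tk x y z st) st =
      l.foldl (fun st z =>
        if z ≠ x ∧ z ≠ y then
          if tk = x ∨ tk = y ∨ tk = z then (st.1 ++ [[x, y, z]], st.2)
          else (st.1, st.2 ++ [[x, y, z]])
        else st) st := by
  intro l
  induction l with
  | nil => intro st; rfl
  | cons z t ih => intro st; simp only [List.foldl_cons, stepA_eq_altStep tk x y z hyx, ih]

-- A's middle suffix fold over the tail equals B's choose_second
theorem suffFold_g2_eq_altSecond (tk x : String) :
    ∀ (l : List String) (st : List (List String) × List (List String)),
      suffFold (g2 tk x) l st = altSecond tk x l st := by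
  intro l
  induction l with
  | nil => intro st; rfl
  | cons y ys ih =>
      intro st
      simp only [suffFold, altSecond, ih]
      congr 1
      by_cases hyx : y = x
      · subst hyx
        simp [g2, List.foldl_cons, stepA_self_left]
      · simp [g2, hyx, List.foldl_cons, fold_stepA_eq_alt tk x y hyx]

-- A's outer suffix fold equals B's choose_first
theorem suffFold_g1_eq_altFirst (tk : String) :
    ∀ (l : List String) (st : List (List String) × List (List String)),
      suffFold (g1 tk) l st = altFirst tk l st := by
  intro l
  induction l with
  | nil => intro st; rfl
  | cons x xs ih =>
      intro st
      simp only [suffFold, altFirst, ih]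
      congr 1
      show suffFold (g2 tk x) (x :: xs) st = altSecond tk x xs st
      -- first suffix starts with x itself: its whole inner fold is the identity
      simp only [suffFold]
      rw [← suffFold_g2_eq_altSecond]
      congr 1
      simp [g2, List.foldl_cons, stepA_self_left]

-- convert A's range-and-index loops to the suffix form, innermost first
theorem innerK_range (tks : List String) (tk x y : String) (j : Nat) (st : List (List String) × List (List String)) :
    (List.range' j (tks.length - j)).foldl (fun st k => stepA tk x y (tks.getD k "") st) st =
      (tks.drop j).foldl (fun st z => stepA tk x y z st) st := by
  have h := range'_drop_fold tks (fun st suf => stepA tk x y (suf.headD "") st) (tks.drop j) j rfl st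
  rw [show (fun st k => stepA tk x y (tks.getD k "") st) =
        (fun st k => stepA tk x y ((tks.drop k).headD "") st) from by
      funext st k; rw [getD_eq_headD_drop tks k _ rfl]]
  rw [h]
  exact suffFold_head "" (fun st z => stepA tk x y z st) (tks.drop j) st

theorem midJ_range (tks : List String) (tk x : String) (i : Nat) (st : List (List String) × List (List String)) :
    (List.range' i (tks.length - i)).foldl (fun st j =>
      (List.range' j (tks.length - j)).foldl
        (fun st k => stepA tk x (tks.getD j "") (tks.getD k "") st) st) st =
      suffFold (g2 tk x) (tks.drop i) st := by
  have h := range'_drop_fold tks (fun st suf => g2 tk x st suf) (tks.drop i) i rfl st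
  rw [← h]
  apply PySem.List.foldl_congr_mem
  intro st j _
  rw [innerK_range, getD_eq_headD_drop tks j _ rfl]
  rfl

theorem A_eq_suffix (tks : List String) (tk : String) :
    get_triple_token tks tk = suffFold (g1 tk) tks ([], []) := by
  unfold get_triple_token
  have h := range'_drop_fold tks (fun st suf => g1 tk st suf) tks 0 rfl ([], [])
  rw [show tks.length = tks.length - 0 from rfl, ← h]
  apply PySem.List.foldl_congr_mem
  intro st i _
  show _ = g1 tk st (tks.drop i)
  unfold g1
  rw [← midJ_range]
  apply PySem.List.foldl_congr_mem
  intro st j _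
  apply PySem.List.foldl_congr_mem
  intro st k _
  rw [getD_eq_headD_drop tks i _ rfl]
  rfl

-- ===== VERDICT (by name: the statement is the Claim_ definition above) =====
theorem get_triple_token_spec : Claim_equal_get_triple_token := by
  intro tks tk _
  show get_triple_token tks tk = get_triple_token_alt tks tk
  rw [A_eq_suffix, suffFold_g1_eq_altFirst]
  rfl
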